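-- pv_equiv track=rewrite | github.com/edomonndo/python-library | test/unit_test/typical_problems_of_sum.test.py | greedy3
-- ===== SOURCE A (Python) =====
-- def greedy3(A):
--     n = len(A)
--     res = 0
--     for i in range(n):
--         for j in range(i + 1, n):
--             for k in range(j + 1, n):
--                 res += A[i] * A[j] * A[k]
--     return res
-- ===== SOURCE B (Python) =====
-- def greedy3(A):
--     res = 0
--     s2 = 0
--     s1 = 0
--     for x in A:
--         res += s2 * x
--         s2 += s1 * x
--         s1 += x
--     return res
-- ===== Notes on version B (the rewrite author's own statement) =====
-- stated objective: faster
-- what changed: Replaced the O(n^3) triple loop over index triples i<j<k by a single left-to-right pass maintaining the running sum, running pair-product sum and running triple-product sum (elementary symmetric polynomials e1,e2,e3).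
import Mathlib
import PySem

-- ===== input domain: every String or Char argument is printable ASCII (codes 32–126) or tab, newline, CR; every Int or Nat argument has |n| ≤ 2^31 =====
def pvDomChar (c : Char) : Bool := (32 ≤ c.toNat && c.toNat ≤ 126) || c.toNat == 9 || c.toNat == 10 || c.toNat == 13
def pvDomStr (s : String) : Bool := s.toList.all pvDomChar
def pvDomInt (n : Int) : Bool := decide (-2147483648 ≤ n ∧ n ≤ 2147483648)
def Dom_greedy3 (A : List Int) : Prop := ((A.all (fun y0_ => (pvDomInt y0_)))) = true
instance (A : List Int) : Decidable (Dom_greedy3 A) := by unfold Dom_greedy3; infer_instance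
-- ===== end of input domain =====

-- B replaces A's O(n^3) triple index loop by one left-to-right pass maintaining the
-- running sums e1, e2, e3 of products of 1, 2, 3 distinct earlier elements (objective: faster).

-- ===== PORT A =====
def greedy3 (A : List Int) : Int :=
  let n : Int := PySem.List.len A
  (PySem.List.pyRange 0 n 1).foldl (fun res i =>
    (PySem.List.pyRange (i + 1) n 1).foldl (fun res j =>
      (PySem.List.pyRange (j + 1) n 1).foldl (fun res k =>
        res + PySem.List.pyGetD A i 0 * PySem.List.pyGetD A j 0 * PySem.List.pyGetD A k 0)
        res) res) 0

-- ===== PORT B =====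
def greedy3_alt (A : List Int) : Int :=
  (A.foldl
    (fun (s : Int × Int × Int) x => (s.1 + s.2.1 * x, s.2.1 + s.2.2 * x, s.2.2 + x))
    (0, 0, 0)).1

-- ===== PRECONDITION & SPEC =====
def Spec_greedy3 (A : List Int) (out : Int) : Prop := out = greedy3_alt A
instance (A : List Int) (out : Int) : Decidable (Spec_greedy3 A out) := by unfold Spec_greedy3; infer_instance

-- ===== CLAIM (what is proved, stated in full; the proofs are below) =====
def Claim_equal_greedy3 : Prop := ∀ (A : List Int), Dom_greedy3 A → Spec_greedy3 A (greedy3 A)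

-- ===== LEMMAS AND PROOFS =====

-- symF F l = Σ over positions p of l of l[p] * F (suffix after p)
def symF (F : List Int → Int) : List Int → Int
  | [] => 0
  | x :: xs => x * F xs + symF F xs

def e2l : List Int → Int := symF (fun l => l.sum)
def e3l : List Int → Int := symF e2l

lemma foldl_addmul (c : Int) (l : List Int) : ∀ res : Int,
    l.foldl (fun r v => r + c * v) res = res + c * l.sum := by
  induction l with
  | nil => simp
  | cons x xs ih => intro res; simp [ih]; ring

lemma sum_shift (A : List Int) (F : List Int → Int) :
    ∀ (d : Nat) (a : Int), 0 ≤ a → A.length ≤ a.toNat + d →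
    ((PySem.List.pyRange a (A.length : Int) 1).map
      (fun j => PySem.List.pyGetD A j 0 * F (A.drop (j + 1).toNat))).sum
      = symF F (A.drop a.toNat) := by
  intro d
  induction d with
  | zero =>
    intro a ha hb
    have h1 : (A.length : Int) ≤ a := by omega
    rw [PySem.List.pyRange_one_eq_nil h1, List.drop_eq_nil_of_le (by omega)]
    simp [symF]
  | succ d ih =>
    intro a ha hb
    by_cases h : a < (A.length : Int)
    · have hlt : a.toNat < A.length := by omega
      rw [PySem.List.pyRange_one_cons h, List.map_cons, List.sum_cons,
        List.drop_eq_getElem_cons hlt, symF,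
        PySem.List.pyGetD_eq_getElem (xs := A) (i := a) (d := 0) ha (by simpa using h)]
      have h1 : (a + 1).toNat = a.toNat + 1 := by omega
      rw [h1, ih (a + 1) (by omega) (by omega)]
      have h2 : (a + 1).toNat = a.toNat + 1 := by omega
      rw [h2]
    · have h1 : (A.length : Int) ≤ a := by omega
      rw [PySem.List.pyRange_one_eq_nil h1, List.drop_eq_nil_of_le (by omega)]
      simp [symF]

lemma inner_eq (A : List Int) (c j res : Int) (hj : 0 ≤ j) :
    (PySem.List.pyRange (j + 1) (A.length : Int) 1).foldl
      (fun r k => r + c * PySem.List.pyGetD A k 0) res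
      = res + c * (A.drop (j + 1).toNat).sum := by
  have h := PySem.List.foldl_pyRange_pyGetD (xs := A) (a := j + 1) (d := 0)
    (f := fun r v => r + c * v) (init := res) (by omega)
  simp only [PySem.List.len_eq] at h
  rw [h, foldl_addmul]

lemma greedy3_eq_e3l (A : List Int) : greedy3 A = e3l A := by
  unfold greedy3
  simp only [PySem.List.len_eq]
  rw [PySem.List.foldl_congr_mem
    (g := fun res i => res + PySem.List.pyGetD A i 0 * e2l (A.drop (i + 1).toNat))]
  · rw [PySem.List.foldl_add]
    rw [sum_shift A e2l A.length 0 le_rfl (by omega)]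
    simp [e3l]
  · intro res i hi
    have hi0 : 0 ≤ i := (PySem.List.mem_pyRange_one.mp hi).1
    rw [PySem.List.foldl_congr_mem
      (g := fun res j => res + PySem.List.pyGetD A i 0 *
        (PySem.List.pyGetD A j 0 * (A.drop (j + 1).toNat).sum))]
    · rw [PySem.List.foldl_add,
        List.sum_map_mul_left,
        sum_shift A (fun l => l.sum) A.length (i + 1) (by omega) (by omega)]
      rfl
    · intro res j hj
      have hj0 : 0 ≤ j := by
        have := (PySem.List.mem_pyRange_one.mp hj).1; omega
      rw [inner_eq A _ j res hj0]
      ring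

lemma alt_inv (l : List Int) : ∀ res s2 s1 : Int,
    l.foldl (fun (s : Int × Int × Int) x => (s.1 + s.2.1 * x, s.2.1 + s.2.2 * x, s.2.2 + x))
      (res, s2, s1)
      = (res + s2 * l.sum + s1 * e2l l + e3l l, s2 + s1 * l.sum + e2l l, s1 + l.sum) := by
  induction l with
  | nil => intro res s2 s1; simp [e2l, e3l, symF]
  | cons x xs ih =>
    intro res s2 s1
    simp only [List.foldl_cons, ih, List.sum_cons, e2l, e3l, symF]
    refine Prod.ext ?_ (Prod.ext ?_ ?_) <;> simp <;> ring

lemma alt_eq_e3l (A : List Int) : greedy3_alt A = e3l A := by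
  unfold greedy3_alt
  rw [alt_inv]
  ring

-- ===== VERDICT (by name: the statement is the Claim_ definition above) =====
theorem greedy3_spec : Claim_equal_greedy3 := by
  intro A _
  unfold Spec_greedy3
  rw [greedy3_eq_e3l, alt_eq_e3l]
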